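-- pv_equiv track=rewrite | github.com/NathanDeMaria/this-is-me-trying | m_2022_06_24_express_711.py | _get_sum_combinations
-- ===== SOURCE A (Python) =====
-- from itertools import product
-- from typing import Iterable
--
-- def _get_sum_combinations(
--     factors: list[int], n_addends: int = 4
-- ) -> Iterable[tuple[int, list[int]]]:
--     """
--     Find all different #s we can sum to with different combinations
--     of these factors into 4 values
--     """
--     assignments = product(*(range(n_addends) for _ in factors))
--     for assignment in assignments:
--         addends = [1 for _ in range(n_addends)]
--         # This is super inefficient. Could be sped up by:
--         # - removing duplicates (since factors aren't unique)
--         # - immediately dropping anything with an addend above 7.11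
--         for factor, index in zip(factors, assignment):
--             addends[index] *= factor
--         yield sum(addends), addends
-- ===== SOURCE B (Python) =====
-- def _get_sum_combinations(factors, n_addends=4):
--     """Recursive slot-assignment enumeration instead of itertools.product."""
--     def rec(i, addends):
--         if i == len(factors):
--             yield sum(addends), list(addends)
--             return
--         f = factors[i]
--         for j in range(n_addends):
--             old = addends[j]
--             addends[j] = old * f
--             yield from rec(i + 1, addends)
--             addends[j] = old
--     yield from rec(0, [1] * n_addends)
-- ===== Notes on version B (the rewrite author's own statement) =====
-- stated objective: alternative
-- what changed: Replaces itertools.product over index tuples plus a per-assignment rebuild of the addends list with a recursive generator that walks the factors, multiplying each factor into one slot at a time with undo, yielding at the base case.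
import Mathlib
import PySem

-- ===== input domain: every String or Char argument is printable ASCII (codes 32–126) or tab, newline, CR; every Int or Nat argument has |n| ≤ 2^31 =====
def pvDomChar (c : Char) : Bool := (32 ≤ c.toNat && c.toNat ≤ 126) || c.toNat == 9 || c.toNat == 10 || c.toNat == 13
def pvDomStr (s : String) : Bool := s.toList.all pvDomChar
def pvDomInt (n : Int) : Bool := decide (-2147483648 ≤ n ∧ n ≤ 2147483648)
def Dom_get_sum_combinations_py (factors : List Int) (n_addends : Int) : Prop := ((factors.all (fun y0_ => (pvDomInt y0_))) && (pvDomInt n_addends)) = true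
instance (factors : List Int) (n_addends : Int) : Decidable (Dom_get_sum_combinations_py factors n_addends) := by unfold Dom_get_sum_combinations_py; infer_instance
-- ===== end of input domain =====

-- B replaces itertools.product + a per-assignment rebuild loop by a recursive helper that
-- threads the addends through the factor list (objective: alternative decomposition, same cost).
-- A and B are generators in Python; the ports return the list of yielded values.

-- ===== PORT A =====
-- itertools.product(*iterables): first iterable outermost (last varies fastest)
def pvProduct : List (List Int) → List (List Int)
  | [] => [[]]
  | xs :: rest => xs.flatMap (fun x => (pvProduct rest).map (fun t => x :: t))

-- addends[index] *= factor : index comes from range(n_addends) and len(addends) = max(n_addends,0),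
-- so the index is always in range; pySetD/pyGetD are exact here.
def get_sum_combinations_py (factors : List Int) (n_addends : Int) : List (Int × List Int) :=
  let assignments := pvProduct (factors.map (fun _ => PySem.List.pyRange 0 n_addends 1))
  assignments.map (fun assignment =>
    let addends0 := (PySem.List.pyRange 0 n_addends 1).map (fun _ => (1 : Int))
    let addends := (factors.zip assignment).foldl
      (fun ad fi => PySem.List.pySetD ad fi.2 (PySem.List.pyGetD ad fi.2 0 * fi.1)) addends0
    (addends.sum, addends))

-- ===== PORT B =====
-- rec(i, addends): for the next factor try each slot j, multiply it in, recurse; mutation+undo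
-- in Python becomes passing the updated list functionally.
def pvRecB (n_addends : Int) : List Int → List Int → List (Int × List Int)
  | [], addends => [(addends.sum, addends)]
  | f :: rest, addends =>
      (PySem.List.pyRange 0 n_addends 1).flatMap (fun j =>
        pvRecB n_addends rest (PySem.List.pySetD addends j (PySem.List.pyGetD addends j 0 * f)))

def get_sum_combinations_py_alt (factors : List Int) (n_addends : Int) : List (Int × List Int) :=
  pvRecB n_addends factors (List.replicate n_addends.toNat 1)

-- ===== PRECONDITION & SPEC =====
def Spec_get_sum_combinations_py (factors : List Int) (n_addends : Int) (out : List (Int × List Int)) : Prop := out = get_sum_combinations_py_alt factors n_addends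
instance (factors : List Int) (n_addends : Int) (out : List (Int × List Int)) : Decidable (Spec_get_sum_combinations_py factors n_addends out) := by unfold Spec_get_sum_combinations_py; infer_instance

-- ===== CLAIM (what is proved, stated in full; the proofs are below) =====
def Claim_equal_get_sum_combinations_py : Prop := ∀ (factors : List Int) (n_addends : Int), Dom_get_sum_combinations_py factors n_addends → Spec_get_sum_combinations_py factors n_addends (get_sum_combinations_py factors n_addends)

-- ===== LEMMAS AND PROOFS =====

-- B's recursion computes A's map-over-product, for any starting addends.
theorem pvRecB_eq (n : Int) (fs : List Int) (ad : List Int) :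
    pvRecB n fs ad =
      (pvProduct (fs.map (fun _ => PySem.List.pyRange 0 n 1))).map (fun assignment =>
        let addends := (fs.zip assignment).foldl
          (fun a fi => PySem.List.pySetD a fi.2 (PySem.List.pyGetD a fi.2 0 * fi.1)) ad
        (addends.sum, addends)) := by
  induction fs generalizing ad with
  | nil => simp [pvRecB, pvProduct]
  | cons f rest ih =>
      simp only [pvRecB, List.map_cons, pvProduct, List.map_flatMap, List.map_map]
      congr 1
      funext j
      rw [ih]
      rfl

theorem init_eq (n : Int) :
    (PySem.List.pyRange 0 n 1).map (fun _ => (1 : Int)) = List.replicate n.toNat 1 := by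
  rw [List.map_const']
  simp [PySem.List.length_pyRange_one]

-- ===== VERDICT (by name: the statement is the Claim_ definition above) =====
theorem get_sum_combinations_py_spec : Claim_equal_get_sum_combinations_py := by
  intro factors n_addends _
  show _ = _
  rw [get_sum_combinations_py_alt, pvRecB_eq, get_sum_combinations_py, init_eq]
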